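-- pv_equiv track=rewrite | github.com/tsb46/scan_physio | scan/model/avg.py | _find_co_localized_events
-- ===== SOURCE A (Python) =====
-- from typing import List, Dict, Tuple, Optional, Union
--
-- def _find_co_localized_events(
--
--     events1: List[int],
--     events2: List[int],
--     tolerance: int
-- ) -> List[Tuple[int, int]]:
--     """
--     Find events that are co-localized within a tolerance window.
--
--     Parameters
--     ----------
--     events1 : List[int]
--         Event indices from first signal
--     events2 : List[int]
--         Event indices from second signal
--     tolerance : int
--         Tolerance window in samples
--
--     Returns
--     -------
--     List[Tuple[int, int]]
--         List of co-localized event pairs (event1_idx, event2_idx)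
--     """
--     co_localized = []
--
--     for event1 in events1:
--         for event2 in events2:
--             if abs(event1 - event2) <= tolerance:
--                 co_localized.append((event1, event2))
--
--     return co_localized
-- ===== SOURCE B (Python) =====
-- from typing import List, Tuple
--
--
-- def _bsearch(vals: List[int], x: int) -> int:
--     """First index i with vals[i] >= x, for vals sorted ascending."""
--     lo, hi = 0, len(vals)
--     while lo < hi:
--         mid = (lo + hi) // 2
--         if vals[mid] < x:
--             lo = mid + 1
--         else:
--             hi = mid
--     return lo
--
--
-- def _find_co_localized_events(
--     events1: List[int],
--     events2: List[int],
--     tolerance: int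
-- ) -> List[Tuple[int, int]]:
--     # Alternative strategy: sort events2 once (keeping original positions),
--     # binary-search the [e1 - tolerance, e1 + tolerance] window for each event1,
--     # and restore the original events2 order by re-sorting the matched
--     # (position, value) pairs.
--     pairs = sorted(enumerate(events2), key=lambda p: p[1])
--     vals = [v for _, v in pairs]
--     out = []
--     for e1 in events1:
--         lo = _bsearch(vals, e1 - tolerance)
--         hi = _bsearch(vals, e1 + tolerance + 1)
--         for p in sorted(pairs[lo:hi], key=lambda p: p[0]):
--             out.append((e1, p[1]))
--     return out
-- ===== Notes on version B (the rewrite author's own statement) =====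
-- stated objective: alternative
-- what changed: Replaces the nested scan by sorting events2 once with its original positions, binary-searching the [e1-tolerance, e1+tolerance] window for each event1, and re-sorting each window's matches by original position to reproduce A's output order exactly; it trades the per-event1 linear scan for binary search plus a per-window sort, which wins when matches are sparse but not when the output is dense.
import Mathlib
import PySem

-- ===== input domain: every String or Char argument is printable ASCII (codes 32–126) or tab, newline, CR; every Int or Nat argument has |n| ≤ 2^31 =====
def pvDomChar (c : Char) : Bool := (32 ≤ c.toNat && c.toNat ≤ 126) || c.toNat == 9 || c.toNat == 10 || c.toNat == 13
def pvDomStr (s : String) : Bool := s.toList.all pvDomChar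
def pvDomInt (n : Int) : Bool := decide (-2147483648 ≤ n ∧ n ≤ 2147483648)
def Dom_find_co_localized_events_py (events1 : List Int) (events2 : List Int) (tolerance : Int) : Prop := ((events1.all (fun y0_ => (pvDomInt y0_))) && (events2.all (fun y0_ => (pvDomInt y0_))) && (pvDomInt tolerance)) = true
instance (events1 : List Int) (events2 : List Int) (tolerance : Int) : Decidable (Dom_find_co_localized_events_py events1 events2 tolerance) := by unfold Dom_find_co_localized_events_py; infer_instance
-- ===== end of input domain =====

-- B replaces A's nested scan by sort + binary search per event1 (re-sorting each
-- window by original position to keep A's exact output order); objective: alternative.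

-- ===== PORT A =====
def find_co_localized_events_py (events1 : List Int) (events2 : List Int) (tolerance : Int) : List (Int × Int) :=
  events1.foldl (fun co_localized event1 =>
    events2.foldl (fun acc event2 =>
      if |event1 - event2| ≤ tolerance then acc ++ [(event1, event2)] else acc) co_localized) []

-- ===== PORT B =====
-- hand-written binary search from Source B (`_bsearch`): first index i with vals[i] ≥ x
def pvBsearchLoop (vals : List Int) (x : Int) (lo hi : Nat) : Nat :=
  if _h : lo < hi then
    let mid := (lo + hi) / 2
    if vals.getD mid 0 < x then pvBsearchLoop vals x (mid + 1) hi
    else pvBsearchLoop vals x lo mid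
  else lo
termination_by hi - lo
decreasing_by all_goals omega

def pvBsearch (vals : List Int) (x : Int) : Nat :=
  pvBsearchLoop vals x 0 vals.length

def find_co_localized_events_py_alt (events1 : List Int) (events2 : List Int) (tolerance : Int) : List (Int × Int) :=
  let pairs := PySem.List.sorted (PySem.List.enumerate events2) (fun p => p.2)
  let vals := pairs.map (fun p => p.2)
  events1.foldl (fun out e1 =>
    let lo := pvBsearch vals (e1 - tolerance)
    let hi := pvBsearch vals (e1 + tolerance + 1)
    out ++ (PySem.List.sorted (PySem.List.slice pairs (some (lo : Int)) (some (hi : Int))) (fun p => p.1)).map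
      (fun p => (e1, p.2))) []

-- ===== PRECONDITION & SPEC =====
def Spec_find_co_localized_events_py (events1 : List Int) (events2 : List Int) (tolerance : Int) (out : List (Int × Int)) : Prop := out = find_co_localized_events_py_alt events1 events2 tolerance
instance (events1 : List Int) (events2 : List Int) (tolerance : Int) (out : List (Int × Int)) : Decidable (Spec_find_co_localized_events_py events1 events2 tolerance out) := by unfold Spec_find_co_localized_events_py; infer_instance

-- ===== CLAIM (what is proved, stated in full; the proofs are below) =====
def Claim_equal_find_co_localized_events_py : Prop := ∀ (events1 : List Int) (events2 : List Int) (tolerance : Int), Dom_find_co_localized_events_py events1 events2 tolerance → Spec_find_co_localized_events_py events1 events2 tolerance (find_co_localized_events_py events1 events2 tolerance)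

-- ===== LEMMAS AND PROOFS =====

-- countP characterisation: if exactly the first r elements are < x, countP (< x) = r
theorem pv_countP_split (x : Int) : ∀ (l : List Int) (r : Nat), r ≤ l.length →
    (∀ j (hj : j < l.length), j < r → l[j] < x) →
    (∀ j (hj : j < l.length), r ≤ j → x ≤ l[j]) →
    l.countP (fun v => decide (v < x)) = r := by
  intro l
  induction l with
  | nil => intro r hr _ _; simp at hr ⊢; omega
  | cons a t ih =>
    intro r hr hlt hge
    cases r with
    | zero =>
      have : ∀ v ∈ a :: t, ¬ (decide (v < x) = true) := by
        intro v hv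
        rcases List.mem_iff_getElem.mp hv with ⟨j, hj, rfl⟩
        simpa using not_lt.mpr (hge j hj (Nat.zero_le _))
      simpa using List.countP_eq_zero.mpr this
    | succ r' =>
      have ha : a < x := by simpa using hlt 0 (by simp) (Nat.succ_pos _)
      have : t.countP (fun v => decide (v < x)) = r' := by
        apply ih r' (by simpa using hr)
        · intro j hj hjr
          have := hlt (j+1) (by simpa using Nat.succ_lt_succ hj) (Nat.succ_lt_succ hjr)
          simpa using this
        · intro j hj hjr
          have := hge (j+1) (by simpa using Nat.succ_lt_succ hj) (Nat.succ_le_succ hjr)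
          simpa using this
      simp [ha, this]

-- binary-search loop invariant: on a sorted list it computes countP (< x)
theorem pvBsearchLoop_eq (vals : List Int) (x : Int)
    (hs : vals.Pairwise (· ≤ ·)) :
    ∀ (n lo hi : Nat), hi - lo ≤ n → lo ≤ hi → hi ≤ vals.length →
    (∀ j (hj : j < vals.length), j < lo → vals[j] < x) →
    (∀ j (hj : j < vals.length), hi ≤ j → x ≤ vals[j]) →
    pvBsearchLoop vals x lo hi = vals.countP (fun v => decide (v < x)) := by
  intro n
  induction n with
  | zero =>
    intro lo hi hn hle hhi hlt hge
    have : lo = hi := by omega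
    subst this
    rw [pvBsearchLoop]
    simp only [lt_irrefl]
    exact (pv_countP_split x vals lo hhi hlt hge).symm
  | succ n ih =>
    intro lo hi hn hle hhi hlt hge
    rw [pvBsearchLoop]
    by_cases h : lo < hi
    · simp only [h, dif_pos]
      have hmid : (lo + hi) / 2 < vals.length := by omega
      have hget : vals.getD ((lo + hi) / 2) 0 = vals[(lo + hi) / 2] :=
        List.getD_eq_getElem vals 0 hmid
      have hmono : ∀ i j (hi' : i < vals.length) (hj' : j < vals.length), i ≤ j → vals[i] ≤ vals[j] := by
        intro i j hi' hj' hij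
        rcases Nat.eq_or_lt_of_le hij with rfl | hij
        · exact le_refl _
        · exact List.pairwise_iff_getElem.mp hs i j hi' hj' hij
      by_cases hm : vals.getD ((lo + hi) / 2) 0 < x
      · simp only [hm, if_pos]
        apply ih ((lo + hi) / 2 + 1) hi (by omega) (by omega) hhi
        · intro j hj hjlt
          calc vals[j] ≤ vals[(lo + hi) / 2] := hmono j _ hj hmid (by omega)
            _ < x := by rwa [hget] at hm
        · exact hge
      · simp only [hm]
        apply ih lo ((lo + hi) / 2) (by omega) (by omega) (by omega) hlt
        · intro j hj hjge
          calc x ≤ vals[(lo + hi) / 2] := by rw [← hget]; exact not_lt.mp hm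
            _ ≤ vals[j] := hmono _ j hmid hj hjge
    · have heq : lo = hi := by omega
      subst heq
      simp only [lt_irrefl]
      exact (pv_countP_split x vals lo hhi hlt hge).symm

theorem pvBsearch_eq (vals : List Int) (x : Int) (hs : vals.Pairwise (· ≤ ·)) :
    pvBsearch vals x = vals.countP (fun v => decide (v < x)) := by
  apply pvBsearchLoop_eq vals x hs vals.length 0 vals.length (by omega) (by omega) (le_refl _)
  · intro j hj h; omega
  · intro j hj h; omega

-- window extraction: on a list sorted by second component, drop/take at the two counts = interval filter
theorem pv_window_filter (a b : Int) : ∀ (l : List (Int × Int)),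
    (l.map (fun p => p.2)).Pairwise (· ≤ ·) →
    (l.drop (l.countP (fun p => decide (p.2 < a)))).take
        (l.countP (fun p => decide (p.2 ≤ b)) - l.countP (fun p => decide (p.2 < a)))
      = l.filter (fun p => decide (a ≤ p.2) && decide (p.2 ≤ b)) := by
  intro l
  induction l with
  | nil => simp
  | cons p t ih =>
    intro hs
    rw [List.map_cons] at hs
    obtain ⟨hhd, hst⟩ := List.pairwise_cons.mp hs
    have hhead : ∀ q ∈ t, p.2 ≤ q.2 := fun q hq => hhd q.2 (List.mem_map_of_mem hq)
    by_cases hpa : p.2 < a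
    · rw [List.countP_cons_of_pos (p := fun q : Int × Int => decide (q.2 < a)) (by simpa using hpa)]
      by_cases hpb : p.2 ≤ b
      · rw [List.countP_cons_of_pos (p := fun q : Int × Int => decide (q.2 ≤ b)) (by simpa using hpb),
          List.filter_cons_of_neg (by simp; omega),
          List.drop_succ_cons, Nat.succ_sub_succ]
        exact ih hst
      · have hcb : (p :: t).countP (fun p => decide (p.2 ≤ b)) = 0 := by
          apply List.countP_eq_zero.mpr
          intro q hq
          rcases List.mem_cons.mp hq with rfl | hq
          · simp; omega
          · have := hhead q hq; simp; omega
        have hf : (p :: t).filter (fun p => decide (a ≤ p.2) && decide (p.2 ≤ b)) = [] := by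
          apply List.filter_eq_nil_iff.mpr
          intro q hq
          rcases List.mem_cons.mp hq with rfl | hq
          · simp; omega
          · have := hhead q hq; simp; omega
        rw [hcb, hf]
        simp
    · have hca : (p :: t).countP (fun p => decide (p.2 < a)) = 0 := by
        apply List.countP_eq_zero.mpr
        intro q hq
        rcases List.mem_cons.mp hq with rfl | hq
        · simp; omega
        · have := hhead q hq; simp; omega
      have hcat : t.countP (fun p => decide (p.2 < a)) = 0 := by
        apply List.countP_eq_zero.mpr
        intro q hq
        have := hhead q hq; simp; omega
      rw [hca, List.drop_zero, Nat.sub_zero]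
      by_cases hpb : p.2 ≤ b
      · rw [List.countP_cons_of_pos (p := fun q : Int × Int => decide (q.2 ≤ b)) (by simpa using hpb),
          List.filter_cons_of_pos (by simp; omega), List.take_succ_cons]
        have := ih hst
        rw [hcat, List.drop_zero, Nat.sub_zero] at this
        rw [this]

      · have hcb : (p :: t).countP (fun p => decide (p.2 ≤ b)) = 0 := by
          apply List.countP_eq_zero.mpr
          intro q hq
          rcases List.mem_cons.mp hq with rfl | hq
          · simp; omega
          · have := hhead q hq; simp; omega
        have hf : (p :: t).filter (fun p => decide (a ≤ p.2) && decide (p.2 ≤ b)) = [] := by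
          apply List.filter_eq_nil_iff.mpr
          intro q hq
          rcases List.mem_cons.mp hq with rfl | hq
          · simp; omega
          · have := hhead q hq; simp; omega
        rw [hcb, hf, List.take_zero]

-- filtered enumerate, mapped through snd, is filter of the underlying list
theorem pv_enum_filter_map (e1 a b : Int) : ∀ (xs : List Int) (s : Int),
    ((PySem.List.enumerate xs s).filter (fun p => decide (a ≤ p.2) && decide (p.2 ≤ b))).map (fun p => (e1, p.2))
      = (xs.filter (fun x => decide (a ≤ x) && decide (x ≤ b))).map (fun x => (e1, x)) := by
  intro xs
  induction xs with
  | nil => intro s; simp [PySem.List.enumerate]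
  | cons x t ih =>
    intro s
    rw [PySem.List.enumerate_cons]
    by_cases hx : (decide (a ≤ x) && decide (x ≤ b)) = true
    · simp only [List.filter_cons, hx, if_pos, List.map_cons, ih]
    · simp only [List.filter_cons, hx, if_neg, Bool.false_eq_true, not_false_iff, ih]

-- the per-event1 row of B equals the per-event1 row of A
theorem pv_row_eq (events2 : List Int) (tolerance e1 : Int) :
    (PySem.List.sorted
        (PySem.List.slice (PySem.List.sorted (PySem.List.enumerate events2) (fun p => p.2))
          (some ((pvBsearch ((PySem.List.sorted (PySem.List.enumerate events2) (fun p => p.2)).map (fun p => p.2)) (e1 - tolerance) : Nat) : Int))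
          (some ((pvBsearch ((PySem.List.sorted (PySem.List.enumerate events2) (fun p => p.2)).map (fun p => p.2)) (e1 + tolerance + 1) : Nat) : Int)))
        (fun p => p.1)).map (fun p => (e1, p.2))
      = (events2.filter (fun event2 => decide (|e1 - event2| ≤ tolerance))).map (fun b => (e1, b)) := by
  set pairs := PySem.List.sorted (PySem.List.enumerate events2) (fun p => p.2) with hpairs
  set vals := pairs.map (fun p => p.2) with hvals
  have hsv : vals.Pairwise (· ≤ ·) := by
    rw [hvals, hpairs]; exact PySem.List.sorted_map_key_pairwise _ _
  have hlo : pvBsearch vals (e1 - tolerance) = pairs.countP (fun p => decide (p.2 < e1 - tolerance)) := by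
    rw [pvBsearch_eq vals _ hsv, hvals, List.countP_map]; rfl
  have hhi : pvBsearch vals (e1 + tolerance + 1) = pairs.countP (fun p => decide (p.2 ≤ e1 + tolerance)) := by
    rw [pvBsearch_eq vals _ hsv, hvals, List.countP_map]
    apply List.countP_congr
    intro p _
    simp
  rw [hlo, hhi, PySem.List.slice_natCast]
  rw [pv_window_filter (e1 - tolerance) (e1 + tolerance) pairs hsv]
  -- name the sorted order: the filtered enumerate is a strictly-fst-increasing permutation
  have hperm : ((PySem.List.enumerate events2 0).filter (fun p => decide (e1 - tolerance ≤ p.2) && decide (p.2 ≤ e1 + tolerance))).Perm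
      (pairs.filter (fun p => decide (e1 - tolerance ≤ p.2) && decide (p.2 ≤ e1 + tolerance))) := by
    exact (List.Perm.filter _ (PySem.List.sorted_perm (PySem.List.enumerate events2) (fun p => p.2) false)).symm
  have hpw : ((PySem.List.enumerate events2 0).filter (fun p => decide (e1 - tolerance ≤ p.2) && decide (p.2 ≤ e1 + tolerance))).Pairwise (fun p q => p.1 < q.1) :=
    (PySem.List.pairwise_lt_enumerate events2 0).filter _
  rw [PySem.List.sorted_eq_of_perm_of_pairwise_lt _ _ _ hperm hpw]
  rw [pv_enum_filter_map e1 (e1 - tolerance) (e1 + tolerance)]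
  congr 1
  apply List.filter_congr
  intro b _
  rw [Bool.eq_iff_iff]
  simp only [Bool.and_eq_true, decide_eq_true_eq]
  rw [abs_le]
  omega

-- ===== VERDICT (by name: the statement is the Claim_ definition above) =====
theorem find_co_localized_events_py_spec : Claim_equal_find_co_localized_events_py := by
  intro events1 events2 tolerance _
  unfold Spec_find_co_localized_events_py find_co_localized_events_py find_co_localized_events_py_alt
  have hA : ∀ (acc : List (Int × Int)),
      events1.foldl (fun co_localized event1 =>
        events2.foldl (fun acc event2 =>
          if |event1 - event2| ≤ tolerance then acc ++ [(event1, event2)] else acc) co_localized) acc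
      = acc ++ events1.flatMap (fun e1 => (events2.filter (fun event2 => decide (|e1 - event2| ≤ tolerance))).map (fun b => (e1, b))) := by
    intro acc
    have : ∀ e1 acc', events2.foldl (fun acc event2 =>
        if |e1 - event2| ≤ tolerance then acc ++ [(e1, event2)] else acc) acc'
        = acc' ++ (events2.filter (fun event2 => decide (|e1 - event2| ≤ tolerance))).map (fun b => (e1, b)) := by
      intro e1 acc'
      have h := PySem.List.foldl_append_if (fun event2 => decide (|e1 - event2| ≤ tolerance)) (fun b => (e1, b)) events2 acc'
      simpa using h
    calc events1.foldl _ acc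
        = events1.foldl (fun acc e1 => acc ++ (events2.filter (fun event2 => decide (|e1 - event2| ≤ tolerance))).map (fun b => (e1, b))) acc := by
          apply PySem.List.foldl_congr_mem
          intro acc' e1 _
          exact this e1 acc'
      _ = _ := PySem.List.foldl_append_eq_flatMap _ events1 acc
  have hB : events1.foldl (fun out e1 =>
      out ++ (PySem.List.sorted
        (PySem.List.slice (PySem.List.sorted (PySem.List.enumerate events2) (fun p => p.2))
          (some ((pvBsearch ((PySem.List.sorted (PySem.List.enumerate events2) (fun p => p.2)).map (fun p => p.2)) (e1 - tolerance) : Nat) : Int))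
          (some ((pvBsearch ((PySem.List.sorted (PySem.List.enumerate events2) (fun p => p.2)).map (fun p => p.2)) (e1 + tolerance + 1) : Nat) : Int)))
        (fun p => p.1)).map (fun p => (e1, p.2))) []
      = events1.flatMap (fun e1 => (events2.filter (fun event2 => decide (|e1 - event2| ≤ tolerance))).map (fun b => (e1, b))) := by
    rw [PySem.List.foldl_append_eq_flatMap, List.nil_append]
    have hrows : (fun e1 => (PySem.List.sorted
        (PySem.List.slice (PySem.List.sorted (PySem.List.enumerate events2) (fun p => p.2))
          (some ((pvBsearch ((PySem.List.sorted (PySem.List.enumerate events2) (fun p => p.2)).map (fun p => p.2)) (e1 - tolerance) : Nat) : Int))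
          (some ((pvBsearch ((PySem.List.sorted (PySem.List.enumerate events2) (fun p => p.2)).map (fun p => p.2)) (e1 + tolerance + 1) : Nat) : Int)))
        (fun p => p.1)).map (fun p => (e1, p.2)))
        = (fun e1 => (events2.filter (fun event2 => decide (|e1 - event2| ≤ tolerance))).map (fun b => (e1, b))) :=
      funext (fun e1 => pv_row_eq events2 tolerance e1)
    rw [hrows]
  rw [hA, List.nil_append, ← hB]
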